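-- pv_equiv track=rewrite | github.com/hohshho/Algorithm | python/programmers/최소직사각형.py | solution
-- ===== SOURCE A (Python) =====
-- def solution(sizes):
--     minSize = 0
--     maxSize = 0
--
--     for size in sizes:
--         temp_min = min(size)
--         temp_max = max(size)
--
--         if((temp_min) > minSize or (temp_max) > maxSize):
--             minSize = max(temp_min, minSize)
--             maxSize = max(temp_max, maxSize)
--
--     return minSize * maxSize
-- ===== SOURCE B (Python) =====
-- def solution(sizes):
--     mins = sorted([0] + [min(s) for s in sizes], reverse=True)
--     maxs = sorted([0] + [max(s) for s in sizes], reverse=True)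
--     return mins[0] * maxs[0]
-- ===== Notes on version B (the rewrite author's own statement) =====
-- stated objective: alternative
-- what changed: Replaces A's single stateful scan with a redundant conditional update by a sort-based selection: the per-card minima and maxima (each seeded with 0, matching A's zero-initialized accumulators and the empty input) are sorted in descending order and the two heads are multiplied.
import Mathlib
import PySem

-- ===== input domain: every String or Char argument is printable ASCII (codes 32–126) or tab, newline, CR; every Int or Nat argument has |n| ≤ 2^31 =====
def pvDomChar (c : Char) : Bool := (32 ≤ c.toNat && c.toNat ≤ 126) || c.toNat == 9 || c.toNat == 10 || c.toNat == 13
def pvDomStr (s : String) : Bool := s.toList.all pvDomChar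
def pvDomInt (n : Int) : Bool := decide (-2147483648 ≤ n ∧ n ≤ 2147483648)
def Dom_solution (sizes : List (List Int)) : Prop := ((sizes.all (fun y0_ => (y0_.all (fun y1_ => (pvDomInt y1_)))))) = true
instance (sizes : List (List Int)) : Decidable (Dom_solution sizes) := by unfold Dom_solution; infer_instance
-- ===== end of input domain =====

-- B replaces A's stateful conditional scan by a sort-based selection (sort descending, take head); objective: alternative.


-- ===== PORT A =====
-- literal transliteration of A: one fold carrying (minSize, maxSize) with the conditional update
def solution (sizes : List (List Int)) : Int :=
  let st := sizes.foldl (fun (p : Int × Int) size =>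
      let temp_min := (PySem.List.min? size (fun y => y)).getD 0
      let temp_max := (PySem.List.max? size (fun y => y)).getD 0
      if temp_min > p.1 ∨ temp_max > p.2 then (max temp_min p.1, max temp_max p.2) else p)
    (0, 0)
  st.1 * st.2

-- ===== PORT B =====
-- port of Source B: sort [0] + per-card mins (resp. maxes) descending, multiply the two heads
-- (mins[0]/maxs[0] never raise since the lists are nonempty; the port uses pyGet? with getD 0 for totality)
def solution_alt (sizes : List (List Int)) : Int :=
  let mins := PySem.List.sorted ((0 : Int) :: sizes.map (fun s => (PySem.List.min? s (fun y => y)).getD 0)) (fun y => y) true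
  let maxs := PySem.List.sorted ((0 : Int) :: sizes.map (fun s => (PySem.List.max? s (fun y => y)).getD 0)) (fun y => y) true
  (PySem.List.pyGet? mins 0).getD 0 * (PySem.List.pyGet? maxs 0).getD 0

-- ===== PRECONDITION & SPEC =====
-- Pre_ excludes exactly the inputs containing an empty inner list, on which A's min(size) raises ValueError
def Pre_solution (sizes : List (List Int)) : Prop := ∀ s ∈ sizes, s ≠ []
instance (sizes : List (List Int)) : Decidable (Pre_solution sizes) := by unfold Pre_solution; infer_instance
def pvWitness_solution : List (List Int) := [[3, 5], [2, 6]]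

def Spec_solution (sizes : List (List Int)) (out : Int) : Prop := out = solution_alt sizes
instance (sizes : List (List Int)) (out : Int) : Decidable (Spec_solution sizes out) := by unfold Spec_solution; infer_instance

-- ===== CLAIM (what is proved, stated in full; the proofs are below) =====
def Claim_equal_solution : Prop := ∀ (sizes : List (List Int)), Dom_solution sizes → Pre_solution sizes → Spec_solution sizes (solution sizes)

-- ===== LEMMAS AND PROOFS =====

-- A's conditional update is the unconditional pairwise max
theorem step_eq (p : Int × Int) (tm tM : Int) :
    (if tm > p.1 ∨ tM > p.2 then (max tm p.1, max tM p.2) else p) = (max tm p.1, max tM p.2) := by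
  split_ifs with h
  · rfl
  · push Not at h
    obtain ⟨h1, h2⟩ := h
    have e1 : max tm p.1 = p.1 := max_eq_right h1
    have e2 : max tM p.2 = p.2 := max_eq_right h2
    simp [e1, e2]

-- A's fold splits into the two running maxima
theorem fold_split (l : List (List Int)) (a b : Int) :
    l.foldl (fun (p : Int × Int) size =>
      let temp_min := (PySem.List.min? size (fun y => y)).getD 0
      let temp_max := (PySem.List.max? size (fun y => y)).getD 0
      if temp_min > p.1 ∨ temp_max > p.2 then (max temp_min p.1, max temp_max p.2) else p)
      (a, b)
    = ((l.map (fun s => (PySem.List.min? s (fun y => y)).getD 0)).foldl max a,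
       (l.map (fun s => (PySem.List.max? s (fun y => y)).getD 0)).foldl max b) := by
  induction l generalizing a b with
  | nil => rfl
  | cons x t ih =>
      simp only [step_eq] at ih ⊢
      simp only [List.foldl_cons, List.map_cons]
      rw [ih]
      simp [max_comm]

-- the head of sorted (a :: xs) descending is the running max xs.foldl max a
theorem head_sorted_rev_eq_foldl_max (a : Int) (xs : List Int) :
    (PySem.List.pyGet? (PySem.List.sorted (a :: xs) (fun y => y) true) 0).getD 0
      = xs.foldl max a := by
  set l := a :: xs with hl
  have hM : PySem.List.max? l (fun y => y) = some (xs.foldl max a) :=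
    PySem.List.max?_id_cons a xs
  have hMmem : xs.foldl max a ∈ l := PySem.List.max?_mem hM
  have hMub : ∀ y ∈ l, y ≤ xs.foldl max a := PySem.List.max?_isMax hM
  cases hs : PySem.List.sorted l (fun y => y) true with
  | nil =>
      exact absurd ((PySem.List.sorted_eq_nil_iff l (fun y => y) true).mp hs) (by simp [hl])
  | cons m t =>
      have hge : ∀ y ∈ l, y ≤ m := PySem.List.key_head_sorted_rev_ge l (fun y => y) hs
      have hmmem : m ∈ l := by
        have : m ∈ PySem.List.sorted l (fun y => y) true := by simp [hs]
        exact (PySem.List.mem_sorted l (fun y => y) true m).mp this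
      have : m = xs.foldl max a := le_antisymm (hMub m hmmem) (hge _ hMmem)
      simp [this]

-- ===== VERDICT (by name: the statement is the Claim_ definition above) =====
theorem solution_spec : Claim_equal_solution := by
  intro sizes _ _
  unfold Spec_solution solution solution_alt
  rw [fold_split]
  simp only [head_sorted_rev_eq_foldl_max]
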